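-- pv_equiv track=rewrite | github.com/wroblewskiwojciech161/Studies | python course/lab2/zad5_pro.py | private_key
-- ===== SOURCE A (Python) =====
-- def gcdExtended(a, b, x, y):
--
--     if a == 0:
--         x = 0
--         y = 1
--         return b
--
--     x1 = 1
--     y1 = 1
--     gcd = gcdExtended(b % a, a, x1, y1)
--
--
--     x = y1 - (b / a) * x1
--     y = x1
--
--     return gcd
--
-- def multinv(modulus, value):
--     #modulo inverse
--
--     x, lastx = 0, 1
--     a, b = modulus, value
--     while b:
--         a, q, b = b, a // b, a % b
--         x, lastx = lastx - q * x, x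
--     result = (1 - lastx * modulus) // value
--     return result + modulus if result < 0 else result
--
-- def private_key(p1,p2):
--     phi = (p1 - 1) * (p2 - 1)
--     n = p1 * p2
--     e = 3
--     while gcdExtended(phi, e, 1, 1) != 1:
--         e += 2
--     d = multinv(phi, e)
--     tab=[]
--     tab.append(d)
--     tab.append(n)
--     return tab
-- ===== SOURCE B (Python) =====
-- def _extgcd_coeff(a, b):
--     # One iterative extended-Euclid pass on (a, b): returns (g, s) where g is the
--     # gcd-chain's final remainder and s the Bezout coefficient of b (g = t*a + s*b).
--     r0, r1 = a, b
--     s0, s1 = 0, 1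
--     while r1:
--         q = r0 // r1
--         r0, r1 = r1, r0 - q * r1
--         s0, s1 = s1, s0 - q * s1
--     return r0, s0
--
-- def private_key(p1, p2):
--     phi = (p1 - 1) * (p2 - 1)
--     n = p1 * p2
--     e = 3
--     while True:
--         g, s = _extgcd_coeff(phi, e)
--         if g == 1:
--             d = s + phi if s < 0 else s
--             return [d, n]
--         e += 2
-- ===== Notes on version B (the rewrite author's own statement) =====
-- stated objective: simpler
-- what changed: B replaces A's recursive gcdExtended (with dead float bookkeeping) plus the separate multinv loop by one iterative extended-Euclid routine that returns gcd and Bezout coefficient together, so the coprimality test and the modular inverse come from a single pass.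
import Mathlib
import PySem

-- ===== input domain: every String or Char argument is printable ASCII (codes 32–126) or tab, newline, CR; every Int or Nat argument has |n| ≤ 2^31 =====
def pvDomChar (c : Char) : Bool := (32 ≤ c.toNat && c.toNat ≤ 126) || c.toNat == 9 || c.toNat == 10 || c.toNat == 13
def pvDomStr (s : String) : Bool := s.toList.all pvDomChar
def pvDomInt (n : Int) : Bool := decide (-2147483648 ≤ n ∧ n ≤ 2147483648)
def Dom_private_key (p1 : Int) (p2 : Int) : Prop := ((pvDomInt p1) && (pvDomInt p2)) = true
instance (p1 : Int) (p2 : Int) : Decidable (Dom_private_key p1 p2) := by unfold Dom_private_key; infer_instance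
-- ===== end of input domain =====

-- B replaces A's recursive-gcd coprimality loop plus separate multinv pass by ONE iterative
-- extended-Euclid routine that yields gcd and Bezout coefficient together (objective: simpler).
-- Python's unbounded `while` loops are ported with a fuel parameter; Pre_ proves it suffices.

-- termination helper, cited by the ports' decreasing_by
theorem pvModLt (a b : Int) (hb : b ≠ 0) : (PySem.Int.mod a b).natAbs < b.natAbs := by
  rcases lt_trichotomy b 0 with h | h | h
  · have e2 := PySem.Int.mod_neg_neg (-a) (-b)
    rw [neg_neg, neg_neg] at e2
    rw [e2, PySem.Int.mod_eq_emod_of_pos (a := -a) (b := -b) (by omega)]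
    have h1 := Int.emod_nonneg (-a) (b := -b) (by omega)
    have h2 := Int.emod_lt_of_pos (-a) (b := -b) (by omega)
    omega
  · exact absurd h hb
  · rw [PySem.Int.mod_eq_emod_of_pos h]
    have h1 := Int.emod_nonneg a hb
    have h2 := Int.emod_lt_of_pos a h
    omega

-- ===== PORT A =====
-- Python's x/y/x1/y1 bookkeeping (incl. the float `y1 - (b / a) * x1`) only writes locals that
-- are discarded; the returned gcd depends on a, b alone, so those dead stores are not modelled.
def gcdExtended (a b x y : Int) : Int :=
  if h : a = 0 then b
  else gcdExtended (PySem.Int.mod b a) a 1 1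
termination_by a.natAbs
decreasing_by exact pvModLt b a h

-- `while b:` of multinv; returns the final (a, lastx)
def multinvLoop (a b x lastx : Int) : Int × Int :=
  if h : b = 0 then (a, lastx)
  else multinvLoop b (PySem.Int.mod a b) (lastx - PySem.Int.floordiv a b * x) x
termination_by b.natAbs
decreasing_by exact pvModLt a b h

def multinv (modulus value : Int) : Int :=
  let p := multinvLoop modulus value 0 1
  let result := PySem.Int.floordiv (1 - p.2 * modulus) value
  if result < 0 then result + modulus else result

-- `while gcdExtended(phi, e, 1, 1) != 1: e += 2`, with fuel (sufficient under Pre_, proved below)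
def searchE (fuel : Nat) (phi e : Int) : Int :=
  match fuel with
  | 0 => e
  | f+1 => if gcdExtended phi e 1 1 ≠ 1 then searchE f phi (e + 2) else e

def private_key (p1 : Int) (p2 : Int) : List Int :=
  let phi := (p1 - 1) * (p2 - 1)
  let n := p1 * p2
  let e := searchE (phi.toNat + 1) phi 3
  let d := multinv phi e
  [d, n]

-- ===== PORT B =====
-- `while r1:` of _extgcd_coeff; returns the final (r0, s0)
def extLoop (r0 r1 s0 s1 : Int) : Int × Int :=
  if h : r1 = 0 then (r0, s0)
  else extLoop r1 (r0 - PySem.Int.floordiv r0 r1 * r1) s1 (s0 - PySem.Int.floordiv r0 r1 * s1)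
termination_by r1.natAbs
decreasing_by
  have e2 := PySem.Int.floordiv_mul_add_mod r0 r1
  have : r0 - PySem.Int.floordiv r0 r1 * r1 = PySem.Int.mod r0 r1 := by omega
  rw [this]; exact pvModLt r0 r1 h

-- `while True:` of B, with fuel (sufficient under Pre_, proved below)
def searchB (fuel : Nat) (phi e n : Int) : List Int :=
  match fuel with
  | 0 => [0, n]
  | f+1 =>
    let p := extLoop phi e 0 1
    if p.1 = 1 then [(if p.2 < 0 then p.2 + phi else p.2), n]
    else searchB f phi (e + 2) n

def private_key_alt (p1 : Int) (p2 : Int) : List Int :=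
  let phi := (p1 - 1) * (p2 - 1)
  searchB (phi.toNat + 1) phi 3 (p1 * p2)

-- ===== PRECONDITION & SPEC =====
-- A's `while` loop diverges whenever phi = (p1-1)*(p2-1) ≤ 0 (the odd e it tests never has
-- gcd 1 with such phi), so Pre_ admits exactly the inputs on which the Python A returns.
def Pre_private_key (p1 : Int) (p2 : Int) : Prop := 1 ≤ (p1 - 1) * (p2 - 1)
instance (p1 : Int) (p2 : Int) : Decidable (Pre_private_key p1 p2) := by unfold Pre_private_key; infer_instance
def pvWitness_private_key : Int × Int := (5, 11)

def Spec_private_key (p1 : Int) (p2 : Int) (out : List Int) : Prop := out = private_key_alt p1 p2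
instance (p1 : Int) (p2 : Int) (out : List Int) : Decidable (Spec_private_key p1 p2 out) := by unfold Spec_private_key; infer_instance

-- ===== CLAIM (what is proved, stated in full; the proofs are below) =====
def Claim_equal_private_key : Prop := ∀ (p1 : Int) (p2 : Int), Dom_private_key p1 p2 → Pre_private_key p1 p2 → Spec_private_key p1 p2 (private_key p1 p2)

-- ===== LEMMAS AND PROOFS =====

-- A's recursive gcd computes Int.gcd on nonnegative arguments
theorem gcd_emod_left (a b : Int) : Int.gcd a (b % a) = Int.gcd a b := by
  have h : b % a = b + (-(b / a)) * a := by rw [Int.emod_def]; ring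
  rw [h, Int.gcd_add_mul_right_right]

theorem gcdExtended_eq_gcd : ∀ (a b x y : Int), 0 ≤ a → 0 ≤ b → gcdExtended a b x y = Int.gcd a b := by
  intro a b x y
  induction a, b, x, y using gcdExtended.induct with
  | case1 b x y =>
    intro _ hb; rw [gcdExtended]; simp [Int.natAbs_of_nonneg hb]
  | case2 a b x y h ih =>
    intro ha _
    have hapos : 0 < a := lt_of_le_of_ne ha (Ne.symm h)
    have hm : PySem.Int.mod b a = b % a := PySem.Int.mod_eq_emod_of_pos hapos
    rw [gcdExtended]; simp only [h, dite_false]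
    rw [ih (by rw [hm]; exact Int.emod_nonneg b (by omega)) ha, hm, Int.gcd_comm, gcd_emod_left]

-- B's loop head computes Int.gcd on nonnegative arguments
theorem extLoop_step_mod (r0 r1 : Int) : r0 - PySem.Int.floordiv r0 r1 * r1 = PySem.Int.mod r0 r1 := by
  have := PySem.Int.floordiv_mul_add_mod r0 r1; omega

theorem extLoop_fst_eq_gcd : ∀ (r0 r1 s0 s1 : Int), 0 ≤ r0 → 0 ≤ r1 → (extLoop r0 r1 s0 s1).1 = Int.gcd r0 r1 := by
  intro r0 r1 s0 s1
  induction r0, r1, s0, s1 using extLoop.induct with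
  | case1 r0 s0 =>
    intro h0 _; rw [extLoop]; simp [Int.natAbs_of_nonneg h0]
  | case2 r0 r1 s0 s1 h ih =>
    intro _ h1
    have h1pos : 0 < r1 := lt_of_le_of_ne h1 (Ne.symm h)
    have hm : PySem.Int.mod r0 r1 = r0 % r1 := PySem.Int.mod_eq_emod_of_pos h1pos
    rw [extLoop]; simp only [h, dite_false]
    rw [ih h1 (by rw [extLoop_step_mod, hm]; exact Int.emod_nonneg r0 (by omega)),
      extLoop_step_mod, hm, gcd_emod_left, Int.gcd_comm]

-- lockstep bisimulation of A's multinv loop and B's loop, with the Bezout invariant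
theorem bisim (M E : Int) : ∀ (r0 r1 s0 s1 x lastx : Int),
    r0 = lastx * M + s0 * E → r1 = x * M + s1 * E →
    (multinvLoop r0 r1 x lastx).1 = (extLoop r0 r1 s0 s1).1 ∧
    (multinvLoop r0 r1 x lastx).1
      = (multinvLoop r0 r1 x lastx).2 * M + (extLoop r0 r1 s0 s1).2 * E := by
  intro r0 r1 s0 s1
  induction r0, r1, s0, s1 using extLoop.induct with
  | case1 r0 s0 =>
    intro x lastx h1 _; rw [extLoop, multinvLoop]; simp; exact h1
  | case2 r0 r1 s0 s1 h ih =>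
    intro x lastx h1 h2
    rw [extLoop, multinvLoop]; simp only [h, dite_false]
    rw [show PySem.Int.mod r0 r1 = r0 - PySem.Int.floordiv r0 r1 * r1 from (extLoop_step_mod r0 r1).symm]
    exact ih (lastx - PySem.Int.floordiv r0 r1 * x) x h2
      (by linear_combination h1 - (PySem.Int.floordiv r0 r1) * h2)

-- at a coprime e, A's multinv produces exactly B's corrected coefficient
theorem d_eq (phi e : Int) (hphi : 1 ≤ phi) (he : 0 < e) (hg : Int.gcd phi e = 1) :
    multinv phi e = (if (extLoop phi e 0 1).2 < 0 then (extLoop phi e 0 1).2 + phi else (extLoop phi e 0 1).2) := by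
  obtain ⟨hfst, hinv⟩ := bisim phi e phi e 0 1 0 1 (by ring) (by ring)
  have hext : (extLoop phi e 0 1).1 = (1 : Int) := by
    rw [extLoop_fst_eq_gcd phi e 0 1 (by omega) (by omega), hg]; simp
  have hone : (multinvLoop phi e 0 1).1 = (1 : Int) := by rw [hfst, hext]
  have hu : 1 - (multinvLoop phi e 0 1).2 * phi = (extLoop phi e 0 1).2 * e := by
    have h := hinv; rw [hone] at h; linarith
  have hdef : multinv phi e =
      (if PySem.Int.floordiv (1 - (multinvLoop phi e 0 1).2 * phi) e < 0
        then PySem.Int.floordiv (1 - (multinvLoop phi e 0 1).2 * phi) e + phi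
        else PySem.Int.floordiv (1 - (multinvLoop phi e 0 1).2 * phi) e) := rfl
  rw [hdef, hu, PySem.Int.floordiv_eq_ediv_of_pos he, Int.mul_ediv_cancel _ (ne_of_gt he)]

-- the two searches agree as long as a coprime e is within fuel
theorem search_eq (phi n : Int) (hphi : 1 ≤ phi) : ∀ (fuel : Nat) (e : Int), 0 < e →
    (∃ k : Nat, k < fuel ∧ Int.gcd phi (e + 2 * k) = 1) →
    searchB fuel phi e n = [multinv phi (searchE fuel phi e), n] := by
  intro fuel
  induction fuel with
  | zero => rintro e _ ⟨k, hk, _⟩; omega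
  | succ f ih =>
    rintro e he ⟨k, hk, hgk⟩
    have hA : gcdExtended phi e 1 1 = ((Int.gcd phi e : Nat) : Int) :=
      gcdExtended_eq_gcd phi e 1 1 (by omega) (by omega)
    have hB : (extLoop phi e 0 1).1 = ((Int.gcd phi e : Nat) : Int) :=
      extLoop_fst_eq_gcd phi e 0 1 (by omega) (by omega)
    by_cases hg : Int.gcd phi e = 1
    · rw [searchE, searchB]
      simp only [hA, hB, hg, Nat.cast_one, ne_eq, not_true_eq_false, if_false, if_true]
      rw [d_eq phi e hphi he hg]
    · have hcast : ((Int.gcd phi e : Nat) : Int) ≠ 1 := by exact_mod_cast hg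
      rw [searchE, searchB]
      simp only [hA, hB, hcast, ne_eq, not_false_eq_true, if_true, if_false]
      have hk0 : k ≠ 0 := by rintro rfl; simp at hgk; exact hg (by simpa using hgk)
      refine ih (e + 2) (by omega) ⟨k - 1, by omega, ?_⟩
      have : e + 2 + 2 * ((k - 1 : Nat) : Int) = e + 2 * (k : Int) := by
        have : ((k - 1 : Nat) : Int) = (k : Int) - 1 := by omega
        rw [this]; ring
      rw [this]; exact hgk

-- fuel suffices: e = 2*phi+1 is odd, coprime to phi, and reached within phi.toNat+1 steps
theorem fuel_ok (phi : Int) (hphi : 1 ≤ phi) :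
    ∃ k : Nat, k < phi.toNat + 1 ∧ Int.gcd phi (3 + 2 * k) = 1 := by
  refine ⟨phi.toNat - 1, by omega, ?_⟩
  have h3 : (3 : Int) + 2 * ((phi.toNat - 1 : Nat) : Int) = 1 + 2 * phi := by omega
  rw [h3, Int.gcd_add_mul_right_right, Int.gcd_one_right]

-- ===== VERDICT (by name: the statement is the Claim_ definition above) =====
theorem private_key_spec : Claim_equal_private_key := by
  intro p1 p2 _hdom hpre
  unfold Spec_private_key private_key private_key_alt
  exact (search_eq ((p1-1)*(p2-1)) (p1*p2) hpre _ 3 (by norm_num)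
    (fuel_ok ((p1-1)*(p2-1)) hpre)).symm
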